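-- pv_equiv track=rewrite | github.com/galliot-us/smart-social-distancing | libs/utils/metrics.py | process_distance_violation_for_object
-- ===== SOURCE A (Python) =====
-- from typing import List, Tuple
--
-- PROCESSING_COUNT_THRESHOLD = 3
--
-- def process_distance_violation_for_object(distance_violations: List[bool]) -> Tuple[int, int]:
--     """
--     Receives a list with the "social distancing detections" (for a single person) and returns a
--     tuple with the summary of detections and violations. Consecutive detections in the same state are
--     grouped and returned as a single one. Detections lower than the constant PROCESSING_COUNT_THRESHOLD
--     are ignored.
--
--     For example, the input [True, True, True, True, True, True, False, True, True, True, True, True, False,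
--     False, False, False, False, False, True, True, True, True, True] returns (3, 2).
--     """
--     # TODO: This is the first version of the metrics and is implemented to feed the current dashboard.
--     # When we define the new metrics we will need to change that logic
--     object_detections = 0
--     object_violations = 0
--     current_status = None
--     processing_status = None
--     processing_count = 0
--
--     for dist_violation in distance_violations:
--         if processing_status != dist_violation:
--             processing_status = dist_violation
--             processing_count = 0
--         processing_count += 1
--         if current_status != processing_status and processing_count >= PROCESSING_COUNT_THRESHOLD:
--             # Object was enouth time in the same state, change it
--             current_status = processing_status
--             object_detections += 1
--             if current_status:
--                 # The object was violating the social distance, report it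
--                 object_violations += 1
--     return object_detections, object_violations
-- ===== SOURCE B (Python) =====
-- from typing import List, Tuple
--
-- PROCESSING_COUNT_THRESHOLD = 3
--
-- def process_distance_violation_for_object(distance_violations: List[bool]) -> Tuple[int, int]:
--     # Stage 1: run-length encode the signal into [value, length] pairs.
--     runs = []
--     for v in distance_violations:
--         if runs and runs[-1][0] == v:
--             runs[-1][1] += 1
--         else:
--             runs.append([v, 1])
--     # Stage 2: keep only values of runs long enough to be committed.
--     kept = [v for v, n in runs if n >= PROCESSING_COUNT_THRESHOLD]
--     # Stage 3: collapse adjacent duplicate states; what remains is the committed state sequence.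
--     committed = [v for v, prev in zip(kept, [None] + kept) if prev != v]
--     return len(committed), sum(committed)
-- ===== Notes on version B (the rewrite author's own statement) =====
-- stated objective: alternative
-- what changed: Replaces A's streaming five-variable state machine by a staged pipeline that materialises the run-length encoding, filters out runs shorter than the threshold, collapses adjacent duplicate states, and reads the answer off the resulting committed-state list.
import Mathlib
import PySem

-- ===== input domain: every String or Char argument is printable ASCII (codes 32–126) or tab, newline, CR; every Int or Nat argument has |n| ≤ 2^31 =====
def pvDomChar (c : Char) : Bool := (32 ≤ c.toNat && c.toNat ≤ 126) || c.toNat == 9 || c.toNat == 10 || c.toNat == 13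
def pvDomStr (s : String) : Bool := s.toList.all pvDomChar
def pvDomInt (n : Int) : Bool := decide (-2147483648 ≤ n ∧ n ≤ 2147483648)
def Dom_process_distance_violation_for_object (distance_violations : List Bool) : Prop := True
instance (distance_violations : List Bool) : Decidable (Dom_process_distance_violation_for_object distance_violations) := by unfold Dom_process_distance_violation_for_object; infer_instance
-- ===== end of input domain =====

-- B replaces A's streaming state machine by a staged pipeline (run-length encode,
-- filter by threshold, collapse adjacent duplicates, count) — alternative decomposition.

-- ===== PORT A =====
-- state: (object_detections, object_violations, current_status, processing_status, processing_count)
def pvStepA (s : Int × Int × Option Bool × Option Bool × Int) (x : Bool) :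
    Int × Int × Option Bool × Option Bool × Int :=
  let (d, w, cur, ps, pc) := s
  let (ps1, pc1) := if ps ≠ some x then (some x, (0 : Int)) else (ps, pc)
  let pc2 := pc1 + 1
  if cur ≠ ps1 ∧ pc2 ≥ 3 then
    (d + 1, if x then w + 1 else w, ps1, ps1, pc2)
  else
    (d, w, cur, ps1, pc2)

def process_distance_violation_for_object (distance_violations : List Bool) : Int × Int :=
  let s := distance_violations.foldl pvStepA (0, 0, none, none, 0)
  (s.1, s.2.1)

-- ===== PORT B =====
-- `if runs and runs[-1][0] == v: runs[-1][1] += 1 else: runs.append([v, 1])`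
def pvRunsStep (runs : List (Bool × Int)) (v : Bool) : List (Bool × Int) :=
  match runs.getLast? with
  | some (u, n) => if u == v then runs.dropLast ++ [(u, n + 1)] else runs ++ [(v, 1)]
  | none => runs ++ [(v, 1)]

def process_distance_violation_for_object_alt (distance_violations : List Bool) : Int × Int :=
  let runs := distance_violations.foldl pvRunsStep []
  let kept := (runs.filter (fun p => p.2 ≥ 3)).map Prod.fst
  -- zip(kept, [None] + kept) truncates to kept's length, exactly as Python's zip
  let committed := ((kept.zip ((none : Option Bool) :: kept.map some)).filter
      (fun p => p.2 != some p.1)).map Prod.fst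
  ((committed.length : Int), committed.foldl (fun s v => s + (if v then 1 else 0)) 0)

-- ===== PRECONDITION & SPEC =====
def Spec_process_distance_violation_for_object (distance_violations : List Bool) (out : Int × Int) : Prop := out = process_distance_violation_for_object_alt distance_violations
instance (distance_violations : List Bool) (out : Int × Int) : Decidable (Spec_process_distance_violation_for_object distance_violations out) := by unfold Spec_process_distance_violation_for_object; infer_instance

-- ===== CLAIM (what is proved, stated in full; the proofs are below) =====
def Claim_equal_process_distance_violation_for_object : Prop := ∀ (distance_violations : List Bool), Dom_process_distance_violation_for_object distance_violations → Spec_process_distance_violation_for_object distance_violations (process_distance_violation_for_object distance_violations)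

-- ===== LEMMAS AND PROOFS =====

-- Run loop over maximal runs (proof-side bridge between the two ports).
def pvAltLoop (cur : Option Bool) (d w : Int) : List Bool → Int × Int
  | [] => (d, w)
  | x :: xs =>
    let length : Int := 1 + (xs.takeWhile (fun y => y == x)).length
    let rest := xs.dropWhile (fun y => y == x)
    if length ≥ 3 ∧ cur ≠ some x then
      pvAltLoop (some x) (d + 1) (if x then w + 1 else w) rest
    else
      pvAltLoop cur d w rest
termination_by l => l.length
decreasing_by
  all_goals
    simp only [List.length_cons]
    exact Nat.lt_succ_of_le (List.length_dropWhile_le _ _)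

-- Same loop expressed on a run list.
def pvRunLoop (cur : Option Bool) (d w : Int) : List (Bool × Int) → Int × Int
  | [] => (d, w)
  | (v, L) :: rest =>
    if L ≥ 3 ∧ cur ≠ some v then
      pvRunLoop (some v) (d + 1) (if v then w + 1 else w) rest
    else
      pvRunLoop cur d w rest

-- Recursive run-length encoding.
def pvRleAux (x : Bool) (n : Int) : List Bool → List (Bool × Int)
  | [] => [(x, n)]
  | y :: ys => if y = x then pvRleAux x (n + 1) ys else (x, n) :: pvRleAux y 1 ys

-- Adjacent-duplicate collapse with a running previous value.
def pvDedup (prev : Option Bool) : List Bool → List Bool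
  | [] => []
  | v :: r => if prev == some v then pvDedup (some v) r else v :: pvDedup (some v) r

-- ---- A = pvAltLoop (run decomposition of A's state machine) ----

lemma pv_fold_same (m : Nat) (d w : Int) (v : Bool) (pc : Int) :
    List.foldl pvStepA (d, w, some v, some v, pc) (List.replicate m v) =
      (d, w, some v, some v, pc + m) := by
  induction m generalizing pc with
  | zero => simp
  | succ m ih =>
    rw [List.replicate_succ, List.foldl_cons]
    have hstep : pvStepA (d, w, some v, some v, pc) v = (d, w, some v, some v, pc + 1) := by
      simp [pvStepA]
    rw [hstep, ih]
    have hpc : pc + 1 + (m : Int) = pc + ((m : Nat) + 1 : Nat) := by push_cast; ring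
    rw [hpc]

lemma pv_fold_diff (m : Nat) (d w : Int) (cur : Option Bool) (v : Bool) (pc : Int)
    (h : cur ≠ some v) :
    List.foldl pvStepA (d, w, cur, some v, pc) (List.replicate m v) =
      if 1 ≤ m ∧ 3 ≤ pc + m then
        (d + 1, if v then w + 1 else w, some v, some v, pc + m)
      else
        (d, w, cur, some v, pc + m) := by
  induction m generalizing pc d w with
  | zero => simp
  | succ m ih =>
    rw [List.replicate_succ, List.foldl_cons]
    have hpc : pc + ((m : Nat) + 1 : Nat) = pc + 1 + (m : Int) := by push_cast; ring
    by_cases hc : (3 : Int) ≤ pc + 1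
    · have hstep : pvStepA (d, w, cur, some v, pc) v =
          (d + 1, if v then w + 1 else w, some v, some v, pc + 1) := by
        simp [pvStepA, h, hc]
      rw [hstep, pv_fold_same, hpc]
      have h' : 1 ≤ m + 1 ∧ 3 ≤ pc + 1 + (m : Int) := by omega
      rw [if_pos h']
    · have hstep : pvStepA (d, w, cur, some v, pc) v = (d, w, cur, some v, pc + 1) := by
        simp [pvStepA, hc]
      rw [hstep, ih, hpc]
      by_cases hm : 1 ≤ m ∧ 3 ≤ pc + 1 + (m : Int)
      · have h' : 1 ≤ m + 1 ∧ 3 ≤ pc + 1 + (m : Int) := ⟨by omega, hm.2⟩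
        rw [if_pos hm, if_pos h']
      · have h' : ¬(1 ≤ m + 1 ∧ 3 ≤ pc + 1 + (m : Int)) := by omega
        rw [if_neg hm, if_neg h']

lemma pv_head_dropWhile {α : Type} (p : α → Bool) (l : List α) (a : α) (t : List α)
    (h : l.dropWhile p = a :: t) : p a = false := by
  induction l with
  | nil => simp at h
  | cons x xs ih =>
    by_cases hp : p x
    · rw [List.dropWhile_cons_of_pos hp] at h; exact ih h
    · rw [List.dropWhile_cons_of_neg hp] at h
      cases h
      simpa using hp

lemma pv_takeWhile_replicate (x : Bool) (xs : List Bool) :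
    xs.takeWhile (fun y => y == x) = List.replicate (xs.takeWhile (fun y => y == x)).length x := by
  apply List.eq_replicate_of_mem
  intro b hb
  have := List.mem_takeWhile_imp hb
  simpa using this

lemma pv_main (n : Nat) : ∀ (l : List Bool), l.length ≤ n →
    ∀ (cur ps : Option Bool) (pc d w : Int),
    (∀ x t, l = x :: t → ps ≠ some x ∨ cur = ps) →
    ((List.foldl pvStepA (d, w, cur, ps, pc) l).1,
     (List.foldl pvStepA (d, w, cur, ps, pc) l).2.1) = pvAltLoop cur d w l := by
  induction n with
  | zero =>
    intro l hl cur ps pc d w _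
    cases l with
    | nil => simp [pvAltLoop]
    | cons x xs => simp at hl
  | succ n ih =>
    intro l hl cur ps pc d w hinv
    cases l with
    | nil => simp [pvAltLoop]
    | cons x xs =>
      have hsplit : xs = xs.takeWhile (fun y => y == x) ++ xs.dropWhile (fun y => y == x) :=
        (List.takeWhile_append_dropWhile).symm
      set k := (xs.takeWhile (fun y => y == x)).length with hk
      set r := xs.dropWhile (fun y => y == x) with hr
      have hxs : xs = List.replicate k x ++ r := by
        conv_lhs => rw [hsplit]
        rw [← pv_takeWhile_replicate]
      have hrlen : r.length ≤ n := by
        have h1 : r.length ≤ xs.length := List.length_dropWhile_le _ _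
        simp only [List.length_cons] at hl
        omega
      have hrhead : ∀ y t, r = y :: t → y ≠ x := by
        intro y t hyt
        have := pv_head_dropWhile (fun y => y == x) xs y t (hr ▸ hyt)
        simpa using this
      rw [List.foldl_cons]
      conv_lhs => rw [hxs]
      rw [List.foldl_append]
      simp only [pvAltLoop]
      rw [← hk, ← hr]
      by_cases hpsx : ps = some x
      · have hcur : cur = some x := by
          rcases hinv x xs rfl with hps | hcur
          · exact absurd hpsx hps
          · rw [hcur, hpsx]
        have hstep : pvStepA (d, w, cur, ps, pc) x = (d, w, some x, some x, pc + 1) := by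
          subst hpsx; subst hcur
          simp [pvStepA]
        have hC : ¬((1 + (k : Int) ≥ 3) ∧ cur ≠ some x) := by simp [hcur]
        rw [hstep, pv_fold_same, if_neg hC, hcur]
        exact ih r hrlen (some x) (some x) (pc + 1 + k) d w
          (fun y t hyt => Or.inr rfl)
      · have hstep : pvStepA (d, w, cur, ps, pc) x = (d, w, cur, some x, 1) := by
          simp [pvStepA, hpsx]
        rw [hstep]
        by_cases hcx : cur = some x
        · have hC : ¬((1 + (k : Int) ≥ 3) ∧ cur ≠ some x) := by simp [hcx]
          subst hcx
          rw [pv_fold_same, if_neg hC]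
          exact ih r hrlen (some x) (some x) (1 + k) d w
            (fun y t hyt => Or.inr rfl)
        · rw [pv_fold_diff k d w cur x 1 hcx]
          by_cases hcom : 1 ≤ k ∧ (3 : Int) ≤ 1 + k
          · have hC : (1 + (k : Int) ≥ 3) ∧ cur ≠ some x := ⟨by omega, hcx⟩
            rw [if_pos hcom, if_pos hC]
            exact ih r hrlen (some x) (some x) (1 + k) (d + 1) (if x then w + 1 else w)
              (fun y t hyt => Or.inr rfl)
          · have hC : ¬((1 + (k : Int) ≥ 3) ∧ cur ≠ some x) := by
              rintro ⟨h3, _⟩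
              exact hcom ⟨by omega, by omega⟩
            rw [if_neg hcom, if_neg hC]
            exact ih r hrlen cur (some x) (1 + k) d w
              (fun y t hyt => Or.inl (by simpa using (hrhead y t hyt).symm))

-- ---- B's foldl RLE = recursive RLE ----

lemma pvRuns_acc (l : List Bool) : ∀ (acc : List (Bool × Int)) (x : Bool) (n : Int),
    List.foldl pvRunsStep (acc ++ [(x, n)]) l = acc ++ pvRleAux x n l := by
  induction l with
  | nil => intro acc x n; simp [pvRleAux]
  | cons y ys ih =>
    intro acc x n
    rw [List.foldl_cons]
    by_cases hyx : y = x
    · have hstep : pvRunsStep (acc ++ [(x, n)]) y = acc ++ [(x, n + 1)] := by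
        simp [pvRunsStep, hyx]
      rw [hstep, ih, pvRleAux, if_pos hyx]
    · have hstep : pvRunsStep (acc ++ [(x, n)]) y = (acc ++ [(x, n)]) ++ [(y, 1)] := by
        simp [pvRunsStep]
        intro h; exact absurd h.symm hyx
      rw [hstep, ih, pvRleAux, if_neg hyx, List.append_assoc]
      rfl

lemma pvRuns_eq (l : List Bool) :
    List.foldl pvRunsStep [] l = match l with
      | [] => []
      | x :: xs => pvRleAux x 1 xs := by
  cases l with
  | nil => rfl
  | cons x xs =>
    rw [List.foldl_cons]
    have hstep : pvRunsStep [] x = [] ++ [(x, 1)] := by simp [pvRunsStep]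
    rw [hstep, pvRuns_acc]
    simp

-- head-run characterisation of pvRleAux
lemma pvRleAux_run (l : List Bool) : ∀ (x : Bool) (n : Int),
    pvRleAux x n l = (x, n + ((l.takeWhile (fun y => y == x)).length : Int)) ::
      (match l.dropWhile (fun y => y == x) with
        | [] => []
        | y :: ys => pvRleAux y 1 ys) := by
  induction l with
  | nil => intro x n; simp [pvRleAux]
  | cons y ys ih =>
    intro x n
    by_cases hyx : y = x
    · rw [pvRleAux, if_pos hyx]
      rw [ih x (n + 1)]
      have ht : (y :: ys).takeWhile (fun z => z == x) = y :: ys.takeWhile (fun z => z == x) :=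
        List.takeWhile_cons_of_pos (by simp [hyx])
      have hd : (y :: ys).dropWhile (fun z => z == x) = ys.dropWhile (fun z => z == x) :=
        List.dropWhile_cons_of_pos (by simp [hyx])
      rw [ht, hd]
      simp only [List.length_cons]
      congr 2
      push_cast; ring
    · rw [pvRleAux, if_neg hyx]
      have ht : (y :: ys).takeWhile (fun z => z == x) = [] :=
        List.takeWhile_cons_of_neg (by simp [hyx])
      have hd : (y :: ys).dropWhile (fun z => z == x) = y :: ys :=
        List.dropWhile_cons_of_neg (by simp [hyx])
      rw [ht, hd]
      simp

-- ---- pvAltLoop = pvRunLoop ∘ RLE ----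

lemma pv_alt_run (n : Nat) : ∀ (l : List Bool), l.length ≤ n →
    ∀ (cur : Option Bool) (d w : Int),
    pvAltLoop cur d w l = pvRunLoop cur d w (List.foldl pvRunsStep [] l) := by
  induction n with
  | zero =>
    intro l hl cur d w
    cases l with
    | nil => simp [pvAltLoop, pvRunLoop]
    | cons x xs => simp at hl
  | succ n ih =>
    intro l hl cur d w
    cases l with
    | nil => simp [pvAltLoop, pvRunLoop]
    | cons x xs =>
      have hrlen : (xs.dropWhile (fun y => y == x)).length ≤ n := by
        have h1 : (xs.dropWhile (fun y => y == x)).length ≤ xs.length :=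
          List.length_dropWhile_le _ _
        simp only [List.length_cons] at hl
        omega
      have htail : ∀ (cur : Option Bool) (d w : Int),
          pvRunLoop cur d w (match xs.dropWhile (fun y => y == x) with
            | [] => []
            | y :: ys => pvRleAux y 1 ys) =
          pvAltLoop cur d w (xs.dropWhile (fun y => y == x)) := by
        intro cur d w
        cases hrc : xs.dropWhile (fun y => y == x) with
        | nil => simp [pvRunLoop, pvAltLoop]
        | cons y ys =>
          rw [ih (y :: ys) (hrc ▸ hrlen) cur d w, pvRuns_eq]
      rw [pvRuns_eq]
      simp only
      rw [pvRleAux_run]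
      rw [pvRunLoop]
      simp only [pvAltLoop]
      by_cases hC : 1 + ((xs.takeWhile (fun y => y == x)).length : Int) ≥ 3 ∧ cur ≠ some x
      · rw [if_pos hC, if_pos hC, htail]
      · rw [if_neg hC, if_neg hC, htail]

-- ---- pvRunLoop = counts of the dedup of the kept values ----

def pvSumB (l : List Bool) : Int := l.foldl (fun s v => s + (if v then 1 else 0)) 0

lemma pvSumB_cons (v : Bool) (l : List Bool) :
    pvSumB (v :: l) = (if v then 1 else 0) + pvSumB l := by
  have h : ∀ (l : List Bool) (s : Int),
      l.foldl (fun s v => s + (if v then 1 else 0)) s =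
        s + l.foldl (fun s v => s + (if v then 1 else 0)) 0 := by
    intro l
    induction l with
    | nil => intro s; simp
    | cons y ys ih =>
      intro s
      simp only [List.foldl_cons]
      rw [ih, ih (0 + _)]
      ring
  simp only [pvSumB, List.foldl_cons]
  rw [h]
  ring

lemma pv_runloop_counts (runs : List (Bool × Int)) :
    ∀ (cur : Option Bool) (d w : Int),
    pvRunLoop cur d w runs =
      (d + ((pvDedup cur ((runs.filter (fun p => p.2 ≥ 3)).map Prod.fst)).length : Int),
       w + pvSumB (pvDedup cur ((runs.filter (fun p => p.2 ≥ 3)).map Prod.fst))) := by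
  induction runs with
  | nil => intro cur d w; simp [pvRunLoop, pvDedup, pvSumB]
  | cons p rest ih =>
    intro cur d w
    obtain ⟨v, L⟩ := p
    by_cases hL : L ≥ 3
    · have hfil : ((v, L) :: rest).filter (fun p => p.2 ≥ 3) =
          (v, L) :: rest.filter (fun p => p.2 ≥ 3) := by
        simp [hL]
      rw [pvRunLoop, hfil]
      simp only [List.map_cons]
      by_cases hcv : cur = some v
      · subst hcv
        rw [if_neg (by rintro ⟨_, h⟩; exact h rfl)]
        rw [ih]
        simp [pvDedup]
      · rw [if_pos ⟨hL, hcv⟩]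
        have hDd : pvDedup cur (v :: (rest.filter (fun p => p.2 ≥ 3)).map Prod.fst) =
            v :: pvDedup (some v) ((rest.filter (fun p => p.2 ≥ 3)).map Prod.fst) := by
          rw [pvDedup, if_neg (by simpa using hcv)]
        rw [hDd, ih]
        simp only [List.length_cons, pvSumB_cons]
        refine Prod.ext ?_ ?_
        · push_cast; ring
        · split_ifs <;> ring
    · have hfil : ((v, L) :: rest).filter (fun p => p.2 ≥ 3) =
          rest.filter (fun p => p.2 ≥ 3) := by
        simp [hL]
      rw [pvRunLoop, if_neg (by rintro ⟨h, _⟩; exact hL h), hfil, ih]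

-- ---- the zip/filter comprehension = pvDedup ----

lemma pv_zip_dedup (l : List Bool) : ∀ (prev : Option Bool),
    ((l.zip (prev :: l.map some)).filter (fun p => p.2 != some p.1)).map Prod.fst =
      pvDedup prev l := by
  induction l with
  | nil => intro prev; simp [pvDedup]
  | cons v r ih =>
    intro prev
    simp only [List.map_cons, List.zip_cons_cons, List.filter_cons]
    by_cases hp : prev = some v
    · subst hp
      rw [if_neg (by simp), pvDedup, if_pos (by simp)]
      exact ih (some v)
    · rw [if_pos (by simpa using hp)]
      rw [pvDedup, if_neg (by simpa using hp)]
      simp only [List.map_cons]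
      rw [ih (some v)]

-- ===== VERDICT (by name: the statement is the Claim_ definition above) =====
theorem process_distance_violation_for_object_spec : Claim_equal_process_distance_violation_for_object := by
  intro l _
  unfold Spec_process_distance_violation_for_object process_distance_violation_for_object
    process_distance_violation_for_object_alt
  simp only
  rw [pv_zip_dedup, pv_main l.length l le_rfl none none 0 0 0 (by intro x t h; left; simp),
    pv_alt_run l.length l le_rfl, pv_runloop_counts]
  simp [pvSumB]
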